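-- pv_equiv track=rewrite | github.com/MatiasDonati/Programacion_I | Desafios Starks/funciones_mejorado_2.py | mostrar_mas_debil
-- ===== SOURCE A (Python) =====
-- def mostrar_mas_debil(lista_personajes:list, genero):
--     '''Devuelve el personaje masculino mas debil'''
--     mas_debil =  None
--     for personaje in lista_personajes:
--         if personaje["genero"] == genero:
--             if mas_debil == None or int(personaje["fuerza"]) < mas_debil:
--                 mas_debil = int(personaje["fuerza"])
--                 nombre_mas_debil = personaje["nombre"]
--
--     if genero == "M":
--         tipo_genero = "Masculino"
--     else:
--         tipo_genero = "NB"
--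
--     if mas_debil == None:
--         mensaje = f"No hay personajes de {tipo_genero}"
--     else:
--         mensaje = f"El {tipo_genero} mas debil es: {nombre_mas_debil}"
--
--     return mensaje
-- ===== SOURCE B (Python) =====
-- def mostrar_mas_debil(lista_personajes: list, genero):
--     '''Devuelve el personaje masculino mas debil'''
--     tipo_genero = "Masculino" if genero == "M" else "NB"
--     fuerzas = [int(p["fuerza"]) for p in lista_personajes if p["genero"] == genero]
--     if not fuerzas:
--         return f"No hay personajes de {tipo_genero}"
--     objetivo = min(fuerzas)
--     for p in lista_personajes:
--         if p["genero"] == genero and int(p["fuerza"]) == objetivo: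
--             return f"El {tipo_genero} mas debil es: {p['nombre']}"
-- ===== Notes on version B (the rewrite author's own statement) =====
-- stated objective: alternative
-- what changed: A tracks the running minimum and its name in one online loop; B stages the work differently: it first computes only the minimum strength VALUE from the matching strengths, then makes a separate search pass that returns the name of the first character attaining that value.
import Mathlib
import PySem

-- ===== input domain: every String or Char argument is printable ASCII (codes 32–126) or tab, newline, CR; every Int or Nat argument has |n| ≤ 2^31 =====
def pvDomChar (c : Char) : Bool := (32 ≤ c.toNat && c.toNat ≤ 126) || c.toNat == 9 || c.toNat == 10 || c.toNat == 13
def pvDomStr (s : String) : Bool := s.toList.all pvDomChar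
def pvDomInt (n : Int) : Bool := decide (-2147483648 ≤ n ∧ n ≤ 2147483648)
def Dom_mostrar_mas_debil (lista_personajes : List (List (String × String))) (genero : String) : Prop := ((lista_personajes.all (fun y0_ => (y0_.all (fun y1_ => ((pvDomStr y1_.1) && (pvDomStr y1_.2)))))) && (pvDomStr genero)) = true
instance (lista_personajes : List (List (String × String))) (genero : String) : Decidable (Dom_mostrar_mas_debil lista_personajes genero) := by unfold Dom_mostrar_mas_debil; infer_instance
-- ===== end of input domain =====

-- B stages the work differently: pass 1 computes only the minimum strength VALUE among the matching
-- characters, pass 2 searches for the first character attaining it and uses its name. Return values only.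

-- ===== PORT A =====
-- dict access personaje[k]: first-match lookup; total via getD (Pre_ guarantees the keys exist and int() parses)
def mostrar_mas_debil (lista_personajes : List (List (String × String))) (genero : String) : String :=
  -- the loop: mas_debil / nombre_mas_debil tracked as one optional pair (nombre only exists once mas_debil is set)
  let st := lista_personajes.foldl (fun st personaje =>
    if ((personaje.lookup "genero").getD "") == genero then
      let f := (PySem.Int.ofStr? ((personaje.lookup "fuerza").getD "")).getD 0
      match st with
      | none => some (f, (personaje.lookup "nombre").getD "")
      | some (m, n) => if f < m then some (f, (personaje.lookup "nombre").getD "") else some (m, n)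
    else st) none
  let tipo_genero := if genero == "M" then "Masculino" else "NB"
  match st with
  | none => "No hay personajes de " ++ tipo_genero
  | some (_, nombre_mas_debil) => "El " ++ tipo_genero ++ " mas debil es: " ++ nombre_mas_debil

-- ===== PORT B =====
-- pass 1: the comprehension of int strengths of matching characters; min(fuerzas) = foldl min;
-- pass 2: the for-loop with early return is List.find?. When fuerzas ≠ [] the loop cannot fall
-- through (the minimum is attained), so the none branch is unreachable; "" stands in for it.
def mostrar_mas_debil_alt (lista_personajes : List (List (String × String))) (genero : String) : String :=
  let tipo_genero := if genero == "M" then "Masculino" else "NB"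
  let fuerzas := (lista_personajes.filter (fun p => ((p.lookup "genero").getD "") == genero)).map
      (fun p => (PySem.Int.ofStr? ((p.lookup "fuerza").getD "")).getD 0)
  match fuerzas with
  | [] => "No hay personajes de " ++ tipo_genero
  | f :: fs =>
    let objetivo := fs.foldl min f
    match lista_personajes.find? (fun p => (((p.lookup "genero").getD "") == genero) &&
        ((PySem.Int.ofStr? ((p.lookup "fuerza").getD "")).getD 0 == objetivo)) with
    | some p => "El " ++ tipo_genero ++ " mas debil es: " ++ ((p.lookup "nombre").getD "")
    | none => ""

-- ===== PRECONDITION & SPEC =====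
-- Pre_ excludes exactly the inputs on which the Python A raises: a character without a "genero" key
-- (KeyError), or a matching character whose "fuerza" is missing / not int()-parsable or whose "nombre"
-- is missing (KeyError / ValueError).
def Pre_mostrar_mas_debil (lista_personajes : List (List (String × String))) (genero : String) : Prop :=
  ∀ p ∈ lista_personajes, (p.lookup "genero").isSome ∧
    (p.lookup "genero" = some genero →
      ((p.lookup "fuerza").bind PySem.Int.ofStr?).isSome ∧ (p.lookup "nombre").isSome)
instance (lista_personajes : List (List (String × String))) (genero : String) : Decidable (Pre_mostrar_mas_debil lista_personajes genero) := by unfold Pre_mostrar_mas_debil; infer_instance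

def pvWitness_mostrar_mas_debil : (List (List (String × String))) × String :=
  ([[("genero", "M"), ("fuerza", "3"), ("nombre", "Ana")], [("genero", "M"), ("fuerza", "1"), ("nombre", "Bo")]], "M")

def Spec_mostrar_mas_debil (lista_personajes : List (List (String × String))) (genero : String) (out : String) : Prop := out = mostrar_mas_debil_alt lista_personajes genero
instance (lista_personajes : List (List (String × String))) (genero : String) (out : String) : Decidable (Spec_mostrar_mas_debil lista_personajes genero out) := by unfold Spec_mostrar_mas_debil; infer_instance

-- ===== CLAIM (what is proved, stated in full; the proofs are below) =====
def Claim_equal_mostrar_mas_debil : Prop := ∀ (lista_personajes : List (List (String × String))) (genero : String), Dom_mostrar_mas_debil lista_personajes genero → Pre_mostrar_mas_debil lista_personajes genero → Spec_mostrar_mas_debil lista_personajes genero (mostrar_mas_debil lista_personajes genero)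

-- ===== LEMMAS AND PROOFS =====

theorem mmd_le_foldl_min (l : List Int) (a : Int) : l.foldl min a ≤ a := by
  induction l generalizing a with
  | nil => simp
  | cons x t ih => exact le_trans (ih (min a x)) (min_le_left a x)

-- first-min tracking from an initial candidate = first element whose key attains the minimum
theorem mmd_fold_eq_find? {α : Type} (key : α → Int) (cs : List α) (c : α) :
    cs.foldl (fun acc x =>
        match acc with
        | none => some x
        | some m => if key x < key m then some x else some m) (some c)
    = (c :: cs).find? (fun p => key p == (cs.map key).foldl min (key c)) := by
  induction cs generalizing c with
  | nil => simp
  | cons x t ih =>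
    simp only [List.foldl, List.map]
    by_cases h : key x < key c
    · rw [if_pos h, ih x]
      rw [min_eq_right (le_of_lt h)]
      have hle : (t.map key).foldl min (key x) ≤ key x := mmd_le_foldl_min _ _
      have hne : (key c == (t.map key).foldl min (key x)) = false := by
        simp only [beq_eq_false_iff_ne]; omega
      conv_rhs => rw [List.find?_cons, hne]
    · rw [if_neg h, ih c]
      have hcx : key c ≤ key x := le_of_not_gt h
      rw [min_eq_left hcx]
      have hle : (t.map key).foldl min (key c) ≤ key c := mmd_le_foldl_min _ _
      by_cases hc : key c = (t.map key).foldl min (key c)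
      · have h1 : (key c == (t.map key).foldl min (key c)) = true := by
          simpa using hc
        rw [List.find?_cons, h1, List.find?_cons, h1]
      · have h1 : (key c == (t.map key).foldl min (key c)) = false := by
          simp only [beq_eq_false_iff_ne]; exact hc
        have h2 : (key x == (t.map key).foldl min (key c)) = false := by
          simp only [beq_eq_false_iff_ne]; omega
        rw [List.find?_cons, h1, List.find?_cons, h1, List.find?_cons, h2]

theorem mmd_fold_isSome {α : Type} (key : α → Int) (cs : List α) (c : α) :
    (cs.foldl (fun acc x =>
        match acc with
        | none => some x
        | some m => if key x < key m then some x else some m) (some c)).isSome := by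
  induction cs generalizing c with
  | nil => rfl
  | cons x t ih =>
    simp only [List.foldl]
    by_cases h : key x < key c
    · rw [if_pos h]; exact ih x
    · rw [if_neg h]; exact ih c

-- find? with a conjunction of predicates = find? of the second over the filter of the first
theorem mmd_find?_filter {α : Type} (l : List α) (p q : α → Bool) :
    l.find? (fun x => p x && q x) = (l.filter p).find? q := by
  induction l with
  | nil => rfl
  | cons x t ih =>
    by_cases hp : p x
    · by_cases hq : q x
      · rw [List.find?_cons, List.filter_cons_of_pos hp, List.find?_cons]
        simp [hp, hq]
      · rw [List.find?_cons, List.filter_cons_of_pos hp, List.find?_cons]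
        simp only [hp, hq, Bool.and_false]
        exact ih
    · rw [List.find?_cons, List.filter_cons_of_neg (by simpa using hp)]
      simp only [hp, Bool.false_and]
      exact ih

-- A's pair-tracking over the candidates projects to element-level first-min tracking.
theorem mmd_fold_aux {α : Type} (key : α → Int) (name : α → String)
    (cs : List α) (acc : Option α) :
    cs.foldl (fun st p =>
        match st with
        | none => some (key p, name p)
        | some (m, n) => if key p < m then some (key p, name p) else some (m, n))
      (acc.map (fun p => (key p, name p)))
    = (cs.foldl (fun acc x =>
        match acc with
        | none => some x
        | some m => if key x < key m then some x else some m) acc).map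
        (fun p => (key p, name p)) := by
  induction cs generalizing acc with
  | nil => rfl
  | cons x t ih =>
    cases acc with
    | none => exact ih (some x)
    | some p =>
      simp only [List.foldl, Option.map_some]
      by_cases h : key x < key p
      · rw [if_pos h, if_pos h]; exact ih (some x)
      · rw [if_neg h, if_neg h]; exact ih (some p)

theorem mostrar_mas_debil_eq (lista_personajes : List (List (String × String))) (genero : String) :
    mostrar_mas_debil lista_personajes genero = mostrar_mas_debil_alt lista_personajes genero := by
  unfold mostrar_mas_debil mostrar_mas_debil_alt
  rw [PySem.List.foldl_if_eq_foldl_filter]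
  have ha := mmd_fold_aux
    (fun p => (PySem.Int.ofStr? ((p.lookup "fuerza").getD "")).getD 0)
    (fun p => (p.lookup "nombre").getD "")
    (lista_personajes.filter (fun p => ((p.lookup "genero").getD "") == genero)) none
  simp only [Option.map_none] at ha
  rw [ha]
  cases hcs : lista_personajes.filter (fun p => ((p.lookup "genero").getD "") == genero) with
  | nil => rfl
  | cons c ct =>
    simp only [List.foldl_cons, List.map_cons]
    rw [mmd_fold_eq_find? (fun p => (PySem.Int.ofStr? ((p.lookup "fuerza").getD "")).getD 0) ct c]
    rw [mmd_find?_filter lista_personajes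
      (fun p => ((p.lookup "genero").getD "") == genero)
      (fun p => ((PySem.Int.ofStr? ((p.lookup "fuerza").getD "")).getD 0 ==
        (ct.map (fun p => (PySem.Int.ofStr? ((p.lookup "fuerza").getD "")).getD 0)).foldl min
          ((PySem.Int.ofStr? ((c.lookup "fuerza").getD "")).getD 0)))]
    rw [hcs]
    have hs := mmd_fold_isSome (fun p => (PySem.Int.ofStr? ((p.lookup "fuerza").getD "")).getD 0) ct c
    rw [mmd_fold_eq_find? (fun p => (PySem.Int.ofStr? ((p.lookup "fuerza").getD "")).getD 0) ct c] at hs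
    cases hf : (c :: ct).find? (fun p =>
        (PySem.Int.ofStr? ((p.lookup "fuerza").getD "")).getD 0 ==
          (ct.map (fun p => (PySem.Int.ofStr? ((p.lookup "fuerza").getD "")).getD 0)).foldl min
            ((PySem.Int.ofStr? ((c.lookup "fuerza").getD "")).getD 0)) with
    | none => rw [hf] at hs; simp at hs
    | some p => rfl

-- ===== VERDICT (by name: the statement is the Claim_ definition above) =====
theorem mostrar_mas_debil_spec : Claim_equal_mostrar_mas_debil := by
  intro l g _ _
  unfold Spec_mostrar_mas_debil
  exact mostrar_mas_debil_eq l g
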